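-- pv_equiv track=rewrite | github.com/BugTraceAI/BugTraceAI-CLI | bugtrace/agents/csti/payloads.py | prioritize_params
-- ===== SOURCE A (Python) =====
-- from typing import Dict, List, Tuple
--
-- HIGH_PRIORITY_PARAMS: List[str] = [
--     # Template-related
--     "template", "tpl", "view", "layout", "page",
--     # Content rendering
--     "content", "text", "body", "message", "msg",
--     "title", "subject", "name", "description",
--     # Dynamic
--     "preview", "render", "output", "display",
--     # Input
--     "input", "value", "data", "query", "q", "search",
--     # File/Path
--     "file", "path", "include", "partial",
--     # ADDED (2026-01-30): Common vulnerable params from real-world findings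
--     "category", "filter", "sort", "lang", "locale", "theme",
-- ]
--
-- def prioritize_params(params: List[Dict]) -> List[Dict]:  # PURE
--     """
--     Prioritize parameters likely to be template-injectable.
--
--     Args:
--         params: List of parameter dicts with 'parameter' key
--
--     Returns:
--         Reordered list: high-priority first, then medium, then low
--     """
--     high = []
--     medium = []
--     low = []
--
--     for item in params:
--         param = item.get("parameter", "").lower()
--
--         is_high = any(hp in param or param in hp for hp in HIGH_PRIORITY_PARAMS)
--
--         if is_high:
--             high.append(item)
--         elif any(x in param for x in ["id", "num", "page", "limit"]):
--             low.append(item)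
--         else:
--             medium.append(item)
--
--     return high + medium + low
-- ===== SOURCE B (Python) =====
-- HIGH_PRIORITY_PARAMS = [
--     "template", "tpl", "view", "layout", "page",
--     "content", "text", "body", "message", "msg",
--     "title", "subject", "name", "description",
--     "preview", "render", "output", "display",
--     "input", "value", "data", "query", "q", "search",
--     "file", "path", "include", "partial",
--     "category", "filter", "sort", "lang", "locale", "theme",
-- ]
--
--
-- def _rank(item):
--     param = item.get("parameter", "").lower()
--     if any(hp in param or param in hp for hp in HIGH_PRIORITY_PARAMS):
--         return 0
--     if any(x in param for x in ("id", "num", "page", "limit")):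
--         return 2
--     return 1
--
--
-- def prioritize_params(params):
--     # stable sort by rank: high (0) first, then medium (1), then low (2)
--     return sorted(params, key=_rank)
-- ===== Notes on version B (the rewrite author's own statement) =====
-- stated objective: idiomatic
-- what changed: Replaced the three explicit accumulator buckets with a rank function (high=0, medium=1, low=2) and a single stable sorted(params, key=rank) call, relying on sort stability to preserve within-bucket input order.
import Mathlib
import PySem

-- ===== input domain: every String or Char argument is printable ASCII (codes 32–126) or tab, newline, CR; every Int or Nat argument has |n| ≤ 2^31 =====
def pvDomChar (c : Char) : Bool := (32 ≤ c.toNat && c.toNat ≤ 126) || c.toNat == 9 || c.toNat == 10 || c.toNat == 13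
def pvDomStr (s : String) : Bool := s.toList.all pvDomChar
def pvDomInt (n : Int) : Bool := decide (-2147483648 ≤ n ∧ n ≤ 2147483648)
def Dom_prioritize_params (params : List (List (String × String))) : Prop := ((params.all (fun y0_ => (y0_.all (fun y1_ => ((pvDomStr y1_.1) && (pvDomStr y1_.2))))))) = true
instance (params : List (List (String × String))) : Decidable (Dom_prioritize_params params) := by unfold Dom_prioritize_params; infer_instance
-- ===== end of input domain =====

-- B replaces A's three explicit buckets with a single stable sort on a 3-valued rank key (idiomatic; same behaviour).


-- module constant HIGH_PRIORITY_PARAMS (shared by both Python files)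
def HIGH_PRIORITY_PARAMS : List String :=
  ["template", "tpl", "view", "layout", "page",
   "content", "text", "body", "message", "msg",
   "title", "subject", "name", "description",
   "preview", "render", "output", "display",
   "input", "value", "data", "query", "q", "search",
   "file", "path", "include", "partial",
   "category", "filter", "sort", "lang", "locale", "theme"]

-- ===== PORT A =====
-- literal transliteration: one loop appending each item to one of three bucket lists, then high ++ medium ++ low
def prioritize_params (params : List (List (String × String))) : List (List (String × String)) :=
  let r := params.foldl
    (fun (acc : List (List (String × String)) × List (List (String × String)) × List (List (String × String))) item =>
      let param := PySem.Str.lower (PySem.Dict.getD ⟨item⟩ "parameter" "")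
      let is_high := HIGH_PRIORITY_PARAMS.any (fun hp => PySem.Str.isIn hp param || PySem.Str.isIn param hp)
      if is_high then (acc.1 ++ [item], acc.2.1, acc.2.2)
      else if (["id", "num", "page", "limit"] : List String).any (fun x => PySem.Str.isIn x param) then
        (acc.1, acc.2.1, acc.2.2 ++ [item])
      else (acc.1, acc.2.1 ++ [item], acc.2.2))
    ([], [], [])
  r.1 ++ r.2.1 ++ r.2.2

-- ===== PORT B =====
-- _rank from Source B
def rankParam (item : List (String × String)) : Int :=
  let param := PySem.Str.lower (PySem.Dict.getD ⟨item⟩ "parameter" "")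
  if HIGH_PRIORITY_PARAMS.any (fun hp => PySem.Str.isIn hp param || PySem.Str.isIn param hp) then 0
  else if (["id", "num", "page", "limit"] : List String).any (fun x => PySem.Str.isIn x param) then 2
  else 1

def prioritize_params_alt (params : List (List (String × String))) : List (List (String × String)) :=
  PySem.List.sorted params rankParam false

-- ===== PRECONDITION & SPEC =====
def Spec_prioritize_params (params : List (List (String × String))) (out : List (List (String × String))) : Prop := out = prioritize_params_alt params
instance (params : List (List (String × String))) (out : List (List (String × String))) : Decidable (Spec_prioritize_params params out) := by unfold Spec_prioritize_params; infer_instance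

-- ===== CLAIM (what is proved, stated in full; the proofs are below) =====
def Claim_equal_prioritize_params : Prop := ∀ (params : List (List (String × String))), Dom_prioritize_params params → Spec_prioritize_params params (prioritize_params params)

-- ===== LEMMAS AND PROOFS =====

theorem rank_cases (x : List (String × String)) :
    rankParam x = 0 ∨ rankParam x = 1 ∨ rankParam x = 2 := by
  unfold rankParam; dsimp only; split_ifs <;> simp

theorem insertBy_append_left {α : Type} (before : α → α → Bool) (x : α) (l r : List α)
    (hl : ∀ y ∈ l, before x y = false) :
    PySem.List.insertBy before x (l ++ r) = l ++ PySem.List.insertBy before x r := by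
  induction l with
  | nil => simp
  | cons y ys ih =>
    have hy := hl y (by simp)
    simp only [List.cons_append, PySem.List.insertBy, hy]
    simp [ih (fun z hz => hl z (by simp [hz]))]

theorem insertBy_of_forall_before {α : Type} (before : α → α → Bool) (x : α) (ys : List α)
    (h : ∀ y ∈ ys, before x y = true) :
    PySem.List.insertBy before x ys = x :: ys := by
  cases ys with
  | nil => simp [PySem.List.insertBy]
  | cons y t => simp [PySem.List.insertBy, h y (by simp)]

-- the insertion-sort fold preserves the three-bucket shape
theorem foldl_insert_buckets (xs : List (List (String × String)))
    (f0 f1 f2 : List (List (String × String)))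
    (h0 : ∀ y ∈ f0, rankParam y = 0) (h1 : ∀ y ∈ f1, rankParam y = 1)
    (h2 : ∀ y ∈ f2, rankParam y = 2) :
    xs.foldl (fun acc x => PySem.List.insertBy (fun a b => decide (rankParam a < rankParam b)) x acc)
      (f0 ++ f1 ++ f2)
    = (f0 ++ xs.filter (fun x => rankParam x == 0))
      ++ (f1 ++ xs.filter (fun x => rankParam x == 1))
      ++ (f2 ++ xs.filter (fun x => rankParam x == 2)) := by
  induction xs generalizing f0 f1 f2 with
  | nil => simp
  | cons x t ih =>
    simp only [List.foldl_cons, List.filter_cons]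
    rcases rank_cases x with hr | hr | hr
    · have hins : PySem.List.insertBy (fun a b => decide (rankParam a < rankParam b)) x (f0 ++ f1 ++ f2)
          = (f0 ++ [x]) ++ f1 ++ f2 := by
        rw [List.append_assoc, insertBy_append_left _ _ f0 _
          (fun y hy => by simp [hr, h0 y hy]),
          insertBy_of_forall_before _ _ _ (fun y hy => by
            rcases List.mem_append.mp hy with hy | hy
            · simp [hr, h1 y hy]
            · simp [hr, h2 y hy])]
        simp
      rw [hins, ih (f0 ++ [x]) f1 f2
        (by intro y hy; rcases List.mem_append.mp hy with hy | hy
            · exact h0 y hy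
            · simp at hy; simpa [hy] using hr) h1 h2]
      simp [hr]
    · have hins : PySem.List.insertBy (fun a b => decide (rankParam a < rankParam b)) x (f0 ++ f1 ++ f2)
          = f0 ++ (f1 ++ [x]) ++ f2 := by
        rw [insertBy_append_left _ _ (f0 ++ f1) _
          (fun y hy => by
            rcases List.mem_append.mp hy with hy | hy
            · simp [hr, h0 y hy]
            · simp [hr, h1 y hy]),
          insertBy_of_forall_before _ _ _ (fun y hy => by simp [hr, h2 y hy])]
        simp
      rw [hins, ih f0 (f1 ++ [x]) f2 h0
        (by intro y hy; rcases List.mem_append.mp hy with hy | hy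
            · exact h1 y hy
            · simp at hy; simpa [hy] using hr) h2]
      simp [hr]
    · have hins : PySem.List.insertBy (fun a b => decide (rankParam a < rankParam b)) x (f0 ++ f1 ++ f2)
          = f0 ++ f1 ++ (f2 ++ [x]) := by
        rw [PySem.List.insertBy_of_forall_not_before _ _ _
          (fun y hy => by
            rcases List.mem_append.mp hy with hy | hy
            · rcases List.mem_append.mp hy with hy | hy
              · simp [hr, h0 y hy]
              · simp [hr, h1 y hy]
            · simp [hr, h2 y hy])]
        simp
      rw [hins, ih f0 f1 (f2 ++ [x]) h0 h1
        (by intro y hy; rcases List.mem_append.mp hy with hy | hy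
            · exact h2 y hy
            · simp at hy; simpa [hy] using hr)]
      simp [hr]

-- B's sort is exactly the three filtered buckets concatenated
theorem sorted_eq_buckets (xs : List (List (String × String))) :
    prioritize_params_alt xs
    = xs.filter (fun x => rankParam x == 0)
      ++ xs.filter (fun x => rankParam x == 1)
      ++ xs.filter (fun x => rankParam x == 2) := by
  unfold prioritize_params_alt
  rw [PySem.List.sorted_eq_foldl_insertBy]
  simpa using foldl_insert_buckets xs [] [] [] (by simp) (by simp) (by simp)

-- A's loop accumulates exactly the three filtered buckets
theorem loopA (xs : List (List (String × String)))
    (h m l : List (List (String × String))) :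
    xs.foldl
      (fun (acc : List (List (String × String)) × List (List (String × String)) × List (List (String × String))) item =>
        let param := PySem.Str.lower (PySem.Dict.getD ⟨item⟩ "parameter" "")
        let is_high := HIGH_PRIORITY_PARAMS.any (fun hp => PySem.Str.isIn hp param || PySem.Str.isIn param hp)
        if is_high then (acc.1 ++ [item], acc.2.1, acc.2.2)
        else if (["id", "num", "page", "limit"] : List String).any (fun x => PySem.Str.isIn x param) then
          (acc.1, acc.2.1, acc.2.2 ++ [item])
        else (acc.1, acc.2.1 ++ [item], acc.2.2))
      (h, m, l)
    = (h ++ xs.filter (fun x => rankParam x == 0),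
       m ++ xs.filter (fun x => rankParam x == 1),
       l ++ xs.filter (fun x => rankParam x == 2)) := by
  induction xs generalizing h m l with
  | nil => simp
  | cons x t ih =>
    simp only [List.foldl_cons, List.filter_cons]
    by_cases hh : HIGH_PRIORITY_PARAMS.any (fun hp =>
        PySem.Str.isIn hp (PySem.Str.lower (PySem.Dict.getD ⟨x⟩ "parameter" ""))
        || PySem.Str.isIn (PySem.Str.lower (PySem.Dict.getD ⟨x⟩ "parameter" "")) hp) = true
    · have hr : rankParam x = 0 := by
        unfold rankParam; dsimp only; rw [if_pos hh]
      try dsimp only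
      rw [if_pos hh, ih]
      simp [hr]
    · by_cases hl : (["id", "num", "page", "limit"] : List String).any
          (fun y => PySem.Str.isIn y (PySem.Str.lower (PySem.Dict.getD ⟨x⟩ "parameter" ""))) = true
      · have hr : rankParam x = 2 := by
          unfold rankParam; try dsimp only
          rw [if_neg hh, if_pos hl]
        try dsimp only
        rw [if_neg hh, if_pos hl, ih]
        simp [hr]
      · have hr : rankParam x = 1 := by
          unfold rankParam; try dsimp only
          rw [if_neg hh, if_neg hl]
        try dsimp only
        rw [if_neg hh, if_neg hl, ih]
        simp [hr]

-- ===== VERDICT (by name: the statement is the Claim_ definition above) =====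
theorem prioritize_params_spec : Claim_equal_prioritize_params := by
  intro params _
  show prioritize_params params = prioritize_params_alt params
  unfold prioritize_params
  rw [loopA, sorted_eq_buckets]
  simp
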